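-- pv_equiv track=rewrite | github.com/SantosJGND/fine-scale-mutation-spectrum-master | slim_pipe/tools/fasta_utilities.py | complement_dicts
-- ===== SOURCE A (Python) =====
-- from itertools import product
--
-- def get_complement(kmer):
--     '''Return complement of a given kmer'''
--     complements= {
--         'A': 'T',
--         'T': 'A',
--         'C': 'G',
--         'G': 'C'
--     }
--
--     comp= [complements[x] for x in kmer][::-1]
--     return comp
--
-- def complement_dicts(bases= 'ACGT',ksize= 3):
--     '''return dict of comp kmers + index dict to parse with'''
--     comp_dict= {}
--     comp_index= {}
--     d= 0
--     base_set= [bases] * ksize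
--     mers= product(*base_set)
--
--     for kmer in mers:
--         kmer= ''.join(kmer)
--         if kmer not in comp_dict.keys():
--             comp_dict[kmer]= d
--
--             comp= get_complement(kmer)
--             comp= ''.join(comp)
--             comp_dict[comp]= d
--
--             comp_index[d]= (kmer,comp)
--             d += 1
--
--     return comp_dict,comp_index
-- ===== SOURCE B (Python) =====
-- from itertools import product
--
-- _COMP = {'A': 'T', 'T': 'A', 'C': 'G', 'G': 'C'}
--
-- def _revcomp(kmer):
--     return ''.join(_COMP[c] for c in reversed(kmer))
--
-- def complement_dicts(bases='ACGT', ksize=3):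
--     '''return dict of comp kmers + index dict to parse with'''
--     kmers = [''.join(t) for t in product(*[bases] * ksize)]
--     first = {}
--     for i, kmer in enumerate(kmers):
--         first.setdefault(kmer, i)
--     pairs = []
--     for i, kmer in enumerate(kmers):
--         if first[kmer] < i:
--             continue                    # repeat of an earlier kmer (bases may repeat)
--         rc = _revcomp(kmer)
--         if rc in first and first[rc] < i:
--             continue                    # complement class already indexed earlier
--         pairs.append((kmer, rc))
--     comp_dict = {}
--     for d, (kmer, rc) in enumerate(pairs):
--         comp_dict[kmer] = d
--         comp_dict[rc] = d
--     comp_index = dict(enumerate(pairs))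
--     return comp_dict, comp_index
-- ===== Notes on version B (the rewrite author's own statement) =====
-- stated objective: alternative
-- what changed: B replaces A's maintained seen-dict dedup with a stateless first-occurrence test (a kmer is kept iff neither it nor its reverse complement occurs strictly earlier in the product enumeration, via a first-occurrence-index dict built once) and builds both output dicts in a separate second pass from the canonical pair list; Pre_ excludes only inputs on which A raises KeyError (a base outside ACGT with ksize > 0 and nonempty bases).
import Mathlib
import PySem

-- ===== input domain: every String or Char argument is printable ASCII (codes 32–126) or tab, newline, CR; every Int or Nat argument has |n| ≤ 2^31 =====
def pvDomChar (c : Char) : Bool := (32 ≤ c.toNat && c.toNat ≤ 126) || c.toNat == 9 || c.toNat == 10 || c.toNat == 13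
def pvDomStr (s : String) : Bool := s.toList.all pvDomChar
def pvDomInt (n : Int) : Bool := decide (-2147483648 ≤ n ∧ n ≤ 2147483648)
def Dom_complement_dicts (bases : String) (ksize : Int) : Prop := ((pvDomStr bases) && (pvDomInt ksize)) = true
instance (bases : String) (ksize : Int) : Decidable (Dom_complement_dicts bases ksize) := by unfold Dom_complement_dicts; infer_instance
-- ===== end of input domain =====

-- B replaces A's maintained seen-dict with a stateless first-occurrence test over a
-- first-occurrence-index dict built once, then builds both output dicts in a second
-- pass from the canonical pair list (objective: alternative decomposition).

-- itertools.product(*([bases]*ksize)): tuples as List Char, leftmost varies slowest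
-- (shared model of the same library call both Pythons make)
def pyProduct (bs : List Char) : Nat → List (List Char)
  | 0 => [[]]
  | Nat.succ k => bs.flatMap (fun c => (pyProduct bs k).map (fun t => c :: t))

-- ===== PORT A =====
-- complements dict of get_complement; 'complements[x]' raises KeyError for a char
-- outside it — such inputs are excluded by Pre_ (the port returns the char itself there)
def complementsA : PySem.Dict Char Char :=
  PySem.Dict.ofList [('A','T'),('T','A'),('C','G'),('G','C')]
def complA (c : Char) : Char := (complementsA.get? c).getD c
-- comp = [complements[x] for x in kmer][::-1]
def get_complement (kmer : List Char) : List Char := (kmer.map complA).reverse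
-- the loop body of A (state: comp_dict, comp_index, d)
def stepA (st : PySem.Dict String Int × PySem.Dict Int (String × String) × Int)
    (kl : List Char) : PySem.Dict String Int × PySem.Dict Int (String × String) × Int :=
  let kmer := String.ofList kl
  if st.1.contains kmer then st
  else
    let cd := st.1.insert kmer st.2.2
    let comp := String.ofList (get_complement kl)
    let cd := cd.insert comp st.2.2
    let ci := st.2.1.insert st.2.2 (kmer, comp)
    (cd, ci, st.2.2 + 1)
def complement_dicts (bases : String) (ksize : Int) :
    (List (String × Int)) × (List (Int × String × String)) :=
  -- base_set = [bases]*ksize is empty for ksize ≤ 0, and product() is one empty tuple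
  let mers := pyProduct bases.toList ksize.toNat
  let res := mers.foldl stepA (PySem.Dict.empty, PySem.Dict.empty, 0)
  (res.1.items, res.2.1.items)

-- ===== PORT B =====
-- _COMP[c]; KeyError for a char outside it is excluded by Pre_ (port returns c there)
def compB : PySem.Dict Char Char :=
  PySem.Dict.ofList [('A','T'),('T','A'),('C','G'),('G','C')]
def complB (c : Char) : Char := (compB.get? c).getD c
-- ''.join(_COMP[c] for c in reversed(kmer))
def revcompB (kl : List Char) : List Char := kl.reverse.map complB
def complement_dicts_alt (bases : String) (ksize : Int) :
    (List (String × Int)) × (List (Int × String × String)) :=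
  -- kmers = [''.join(t) for t in product(*[bases] * ksize)]
  let kmers : List String := (pyProduct bases.toList ksize.toNat).map String.ofList
  -- first = {}; for i, kmer in enumerate(kmers): first.setdefault(kmer, i)
  let first : PySem.Dict String Int :=
    (PySem.List.enumerate kmers).foldl (fun d p => d.setdefault p.2 p.1) PySem.Dict.empty
  -- second pass: keep a kmer iff neither it nor its reverse complement occurs earlier
  let pairs : List (String × String) :=
    (PySem.List.enumerate kmers).foldl (fun ps p =>
      -- first[kmer] < i  (kmer is always a key of first)
      if (first.get? p.2).getD 0 < p.1 then ps
      else
        let rc := String.ofList (revcompB p.2.toList)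
        -- rc in first and first[rc] < i
        if first.contains rc && decide ((first.get? rc).getD 0 < p.1) then ps
        else ps ++ [(p.2, rc)]) []
  -- comp_dict built from the pair list
  let comp_dict : PySem.Dict String Int :=
    (PySem.List.enumerate pairs).foldl
      (fun d q => (d.insert q.2.1 q.1).insert q.2.2 q.1) PySem.Dict.empty
  -- comp_index = dict(enumerate(pairs))
  let comp_index : PySem.Dict Int (String × String) :=
    (PySem.List.enumerate pairs).foldl (fun d q => d.insert q.1 q.2) PySem.Dict.empty
  (comp_dict.items, comp_index.items)

-- ===== PRECONDITION & SPEC =====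
-- Pre_ excludes exactly the inputs where A raises KeyError: some generated kmer is
-- nonempty and contains a character outside 'ACGT' (i.e. bases has a bad char,
-- bases ≠ '' and ksize > 0).
def Pre_complement_dicts (bases : String) (ksize : Int) : Prop :=
  (bases.toList.all (fun c => c == 'A' || c == 'C' || c == 'G' || c == 'T')) = true ∨
    ksize ≤ 0 ∨ bases = ""
instance (bases : String) (ksize : Int) : Decidable (Pre_complement_dicts bases ksize) := by
  unfold Pre_complement_dicts; infer_instance
def pvWitness_complement_dicts : String × Int := ("ACGT", 2)
def Spec_complement_dicts (bases : String) (ksize : Int)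
    (out : (List (String × Int)) × (List (Int × String × String))) : Prop :=
  out = complement_dicts_alt bases ksize
instance (bases : String) (ksize : Int)
    (out : (List (String × Int)) × (List (Int × String × String))) :
    Decidable (Spec_complement_dicts bases ksize out) := by
  unfold Spec_complement_dicts; infer_instance

-- ===== CLAIM (what is proved, stated in full; the proofs are below) =====
def Claim_equal_complement_dicts : Prop :=
  ∀ (bases : String) (ksize : Int), Dom_complement_dicts bases ksize →
    Pre_complement_dicts bases ksize →
    Spec_complement_dicts bases ksize (complement_dicts bases ksize)

-- ===== LEMMAS AND PROOFS =====

-- ---- characters and reverse complement ----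
def ACGTp (c : Char) : Prop := c = 'A' ∨ c = 'C' ∨ c = 'G' ∨ c = 'T'

theorem complB_eq_complA : complB = complA := rfl

theorem complA_invol {c : Char} (h : ACGTp c) : complA (complA c) = c := by
  rcases h with h | h | h | h <;> subst h <;> decide

theorem revcompB_eq : revcompB = get_complement := by
  funext kl
  simp [revcompB, get_complement, complB_eq_complA, List.map_reverse]

theorem rc_invol {x : List Char} (h : ∀ c ∈ x, ACGTp c) :
    get_complement (get_complement x) = x := by
  simp only [get_complement, List.map_reverse, List.reverse_reverse, List.map_map]
  conv_rhs => rw [← List.map_id x]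
  exact List.map_congr_left (fun a ha => complA_invol (h a ha))

theorem ofList_inj {a b : List Char} (h : String.ofList a = String.ofList b) : a = b := by
  have := congrArg String.toList h; simpa using this

-- ---- pyProduct membership ----
theorem mem_pyProduct {bs : List Char} :
    ∀ (k : Nat) (x : List Char), x ∈ pyProduct bs k ↔ x.length = k ∧ ∀ c ∈ x, c ∈ bs := by
  intro k
  induction k with
  | zero =>
    intro x
    simp only [pyProduct, List.mem_singleton]
    constructor
    · rintro rfl; simp
    · rintro ⟨h, _⟩; exact List.eq_nil_of_length_eq_zero h
  | succ k ih =>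
    intro x
    simp only [pyProduct, List.mem_flatMap, List.mem_map]
    constructor
    · rintro ⟨c, hc, t, ht, rfl⟩
      obtain ⟨hlen, hmem⟩ := (ih t).mp ht
      refine ⟨by simp [hlen], ?_⟩
      intro d hd
      rcases List.mem_cons.mp hd with rfl | hd
      · exact hc
      · exact hmem d hd
    · rintro ⟨hlen, hmem⟩
      match x with
      | [] => simp at hlen
      | c :: t =>
        refine ⟨c, hmem c (by simp), t, (ih t).mpr ⟨by simpa using hlen, ?_⟩, rfl⟩
        exact fun d hd => hmem d (by simp [hd])

-- ---- canonical pair extraction (what A's loop computes) ----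
def pairsA (P : List (List Char)) : List (List Char) → List (List Char × List Char)
  | [] => []
  | x :: xs =>
      if x ∈ P ∨ get_complement x ∈ P then pairsA (x :: P) xs
      else (x, get_complement x) :: pairsA (x :: P) xs

-- the same extraction at the String level, with B's reverse complement
def rcS (s : String) : String := String.ofList (revcompB s.toList)

def pairsS (P : List String) : List String → List (String × String)
  | [] => []
  | x :: xs =>
      if x ∈ P ∨ rcS x ∈ P then pairsS (x :: P) xs
      else (x, rcS x) :: pairsS (x :: P) xs

-- ---- dict-building recursions ----
def cdAux (d : PySem.Dict String Int) (n : Int) :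
    List (List Char × List Char) → PySem.Dict String Int
  | [] => d
  | p :: ps => cdAux ((d.insert (String.ofList p.1) n).insert (String.ofList p.2) n) (n + 1) ps

def ciAux (d : PySem.Dict Int (String × String)) (n : Int) :
    List (List Char × List Char) → PySem.Dict Int (String × String)
  | [] => d
  | p :: ps => ciAux (d.insert n (String.ofList p.1, String.ofList p.2)) (n + 1) ps

theorem foldA_eq :
    ∀ (L : List (List Char)) (cd : PySem.Dict String Int)
      (ci : PySem.Dict Int (String × String)) (n : Int) (P : List (List Char)),
      (∀ x ∈ L, ∀ c ∈ x, ACGTp c) → (∀ x ∈ P, ∀ c ∈ x, ACGTp c) →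
      (∀ x : List Char, (∀ c ∈ x, ACGTp c) →
        (cd.contains (String.ofList x) = true ↔ x ∈ P ∨ get_complement x ∈ P)) →
      L.foldl stepA (cd, ci, n) =
        (cdAux cd n (pairsA P L), ciAux ci n (pairsA P L), n + (pairsA P L).length) := by
  intro L
  induction L with
  | nil =>
    intro cd ci n P _ _ _
    simp [pairsA, cdAux, ciAux]
  | cons x xs ih =>
    intro cd ci n P hL hP hinv
    have hx : ∀ c ∈ x, ACGTp c := hL x (by simp)
    have hLtail : ∀ y ∈ xs, ∀ c ∈ y, ACGTp c := fun y hy => hL y (by simp [hy])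
    have hrc_iff : ∀ y : List Char, (∀ c ∈ y, ACGTp c) →
        (y = get_complement x ↔ get_complement y = x) := by
      intro y hy
      constructor
      · rintro rfl; exact rc_invol hx
      · rintro rfl; exact (rc_invol hy).symm
    rw [List.foldl_cons]
    by_cases hskip : x ∈ P ∨ get_complement x ∈ P
    · have hct : cd.contains (String.ofList x) = true := (hinv x hx).mpr hskip
      have hstep : stepA (cd, ci, n) x = (cd, ci, n) := by
        simp [stepA, hct]
      rw [hstep]
      have hP' : ∀ y ∈ x :: P, ∀ c ∈ y, ACGTp c := by
        intro y hy
        rcases List.mem_cons.mp hy with rfl | hy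
        · exact hx
        · exact hP y hy
      have hinv' : ∀ y : List Char, (∀ c ∈ y, ACGTp c) →
          (cd.contains (String.ofList y) = true ↔ y ∈ x :: P ∨ get_complement y ∈ x :: P) := by
        intro y hy
        rw [hinv y hy]
        simp only [List.mem_cons]
        constructor
        · rintro (h | h)
          · exact Or.inl (Or.inr h)
          · exact Or.inr (Or.inr h)
        · rintro ((rfl | h) | h)
          · exact hskip
          · exact Or.inl h
          · rcases h with h | h
            · have hyx : y = get_complement x := (hrc_iff y hy).mpr h
              subst hyx
              rcases hskip with h2 | h2
              · exact Or.inr (by rw [rc_invol hx]; exact h2)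
              · exact Or.inl h2
            · exact Or.inr h
      rw [ih cd ci n (x :: P) hLtail hP' hinv']
      rw [show pairsA P (x :: xs) = pairsA (x :: P) xs by simp [pairsA, hskip]]
    · have hct : cd.contains (String.ofList x) = false := by
        cases h : cd.contains (String.ofList x)
        · rfl
        · exact absurd ((hinv x hx).mp h) hskip
      have hstep : stepA (cd, ci, n) x =
          ((cd.insert (String.ofList x) n).insert (String.ofList (get_complement x)) n,
           ci.insert n (String.ofList x, String.ofList (get_complement x)), n + 1) := by
        simp [stepA, hct]
      rw [hstep]
      have hP' : ∀ y ∈ x :: P, ∀ c ∈ y, ACGTp c := by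
        intro y hy
        rcases List.mem_cons.mp hy with rfl | hy
        · exact hx
        · exact hP y hy
      have hinv' : ∀ y : List Char, (∀ c ∈ y, ACGTp c) →
          (((cd.insert (String.ofList x) n).insert (String.ofList (get_complement x)) n).contains
              (String.ofList y) = true ↔ y ∈ x :: P ∨ get_complement y ∈ x :: P) := by
        intro y hy
        rw [PySem.Dict.contains_insert, PySem.Dict.contains_insert]
        simp only [Bool.or_eq_true, beq_iff_eq, hinv y hy, List.mem_cons]
        have hofl : ∀ a b : List Char, (String.ofList a = String.ofList b) ↔ a = b := by
          intro a b
          exact ⟨ofList_inj, by rintro rfl; rfl⟩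
        rw [hofl, hofl]
        rw [hrc_iff y hy]
        tauto
      rw [ih _ _ (n + 1) (x :: P) hLtail hP' hinv']
      rw [show pairsA P (x :: xs) = (x, get_complement x) :: pairsA (x :: P) xs by
        simp [pairsA, hskip]]
      refine Prod.ext rfl (Prod.ext rfl ?_)
      show n + 1 + ((pairsA (x :: P) xs).length : Int) =
        n + (((x, get_complement x) :: pairsA (x :: P) xs).length : Int)
      simp only [List.length_cons]
      push_cast
      ring

theorem acgt_of_pre (bases : String) (ksize : Int) (h : Pre_complement_dicts bases ksize) :
    ∀ x ∈ pyProduct bases.toList ksize.toNat, ∀ c ∈ x, ACGTp c := by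
  rcases h with h | h | h
  · intro x hx c hc
    have hc' := List.all_eq_true.mp h c (((mem_pyProduct _ x).mp hx).2 c hc)
    unfold ACGTp; simp only [Bool.or_eq_true, beq_iff_eq] at hc'; tauto
  · have h0 : ksize.toNat = 0 := by omega
    rw [h0]
    intro x hx
    simp only [pyProduct, List.mem_singleton] at hx
    subst hx
    simp
  · subst h
    intro x hx c hc
    have := ((mem_pyProduct _ x).mp hx).2 c hc
    simp at this

-- ---- pairsA at the String level ----
theorem map_pairsA :
    ∀ (L P : List (List Char)),
      (pairsA P L).map (fun p => (String.ofList p.1, String.ofList p.2)) =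
        pairsS (P.map String.ofList) (L.map String.ofList) := by
  intro L
  induction L with
  | nil => intro P; rfl
  | cons x xs ih =>
    intro P
    have hrc : rcS (String.ofList x) = String.ofList (get_complement x) := by
      simp [rcS, revcompB_eq]
    have hmem : ∀ y : List Char,
        (String.ofList y ∈ P.map String.ofList) ↔ y ∈ P := by
      intro y
      constructor
      · intro h
        obtain ⟨a, ha, hae⟩ := List.mem_map.mp h
        rwa [← ofList_inj hae]
      · exact List.mem_map_of_mem
    simp only [List.map_cons, pairsA, pairsS, hrc]
    by_cases hsk : x ∈ P ∨ get_complement x ∈ P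
    · rw [if_pos hsk, if_pos (by rw [hmem, hmem]; exact hsk)]
      have := ih (x :: P)
      simpa using this
    · rw [if_neg hsk, if_neg (by rw [hmem, hmem]; exact hsk)]
      simp only [List.map_cons]
      have := ih (x :: P)
      simpa using this

-- ---- the first-occurrence dict ----
theorem first_get? :
    ∀ (Ls : List String) (s : Int) (d : PySem.Dict String Int) (x : String),
      ((PySem.List.enumerate Ls s).foldl (fun d p => d.setdefault p.2 p.1) d).get? x =
        if d.contains x then d.get? x
        else if x ∈ Ls then some (s + (Ls.idxOf x : Int)) else none := by
  intro Ls
  induction Ls with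
  | nil =>
    intro s d x
    simp only [PySem.List.enumerate_nil, List.foldl_nil, List.not_mem_nil, if_false]
    by_cases h : d.contains x = true
    · rw [if_pos h]
    · rw [if_neg h]
      have : (d.get? x).isSome = false := by
        rw [← PySem.Dict.contains_eq_isSome_get?]
        simpa using h
      exact Option.not_isSome_iff_eq_none.mp (by simp [this])
  | cons u us ih =>
    intro s d x
    rw [PySem.List.enumerate_cons, List.foldl_cons]
    rw [ih (s + 1) (d.setdefault u s) x]
    by_cases hxu : x = u
    · subst hxu
      rw [if_pos (by rw [PySem.Dict.contains_setdefault]; simp)]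
      rw [PySem.Dict.get?_setdefault_self]
      by_cases hc : d.contains x = true
      · rw [if_pos hc]
        obtain ⟨v, hv⟩ : ∃ v, d.get? x = some v := Option.isSome_iff_exists.mp
          (by rw [← PySem.Dict.contains_eq_isSome_get?]; exact hc)
        rw [hv]
        rfl
      · rw [if_neg hc, if_pos (List.mem_cons_self)]
        have hn : d.get? x = none := by
          have : (d.get? x).isSome = false := by
            rw [← PySem.Dict.contains_eq_isSome_get?]; simpa using hc
          simpa using this
        rw [hn, List.idxOf_cons_self]
        simp
    · rw [PySem.Dict.contains_setdefault,
        PySem.Dict.get?_setdefault_of_ne d s hxu]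
      have hbe : (x == u) = false := by simp [hxu]
      rw [hbe, Bool.false_or]
      by_cases hc : d.contains x = true
      · rw [if_pos hc, if_pos hc]
      · rw [if_neg hc, if_neg hc]
        have hmem : x ∈ u :: us ↔ x ∈ us := by simp [hxu]
        by_cases hm : x ∈ us
        · rw [if_pos hm, if_pos (hmem.mpr hm)]
          rw [List.idxOf_cons_ne _ (fun h => hxu h.symm)]
          push_cast
          ring_nf
        · rw [if_neg hm, if_neg (fun h => hm (hmem.mp h))]

-- ---- B's second pass computes pairsS ----
theorem foldB_pairs (Ls : List String) (F : PySem.Dict String Int)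
    (hF : ∀ x, F.get? x = if x ∈ Ls then some ((Ls.idxOf x : Int)) else none) :
    ∀ (suf pre P : List String) (acc : List (String × String)) (s : Int),
      Ls = pre ++ suf → (∀ a, a ∈ P ↔ a ∈ pre) → s = (pre.length : Int) →
      (PySem.List.enumerate suf s).foldl
        (fun ps p =>
          if (F.get? p.2).getD 0 < p.1 then ps
          else
            if F.contains (String.ofList (revcompB p.2.toList)) &&
                decide ((F.get? (String.ofList (revcompB p.2.toList))).getD 0 < p.1) then ps
            else ps ++ [(p.2, String.ofList (revcompB p.2.toList))]) acc =
      acc ++ pairsS P suf := by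
  intro suf
  induction suf with
  | nil =>
    intro pre P acc s _ _ _
    simp [PySem.List.enumerate_nil, pairsS]
  | cons x xs ih =>
    intro pre P acc s hL hP hs
    subst hL
    subst hs
    rw [PySem.List.enumerate_cons, List.foldl_cons]
    -- the element x of the kmer list sits at position pre.length
    have hxLs : x ∈ pre ++ x :: xs := by simp
    have hget : F.get? x = some (((pre ++ x :: xs).idxOf x : Int)) := by
      rw [hF, if_pos hxLs]
    have hprefix : ∀ y : String, y ∈ pre ++ x :: xs →
        (pre ++ x :: xs).idxOf y < pre.length → y ∈ pre := by
      intro y hy hlt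
      have hlen : (pre ++ x :: xs).idxOf y < (pre ++ x :: xs).length :=
        List.idxOf_lt_length_of_mem hy
      have hy' : (pre ++ x :: xs)[(pre ++ x :: xs).idxOf y] = y := List.getElem_idxOf hlen
      rw [List.getElem_append_left hlt] at hy'
      exact hy' ▸ List.getElem_mem _
    -- first[x] < i  ⟺  x occurred in the prefix
    have hidx1 : (((pre ++ x :: xs).idxOf x : Int) < (pre.length : Int)) ↔ x ∈ pre := by
      constructor
      · intro hlt
        exact hprefix x hxLs (by exact_mod_cast hlt)
      · intro hmem
        rw [List.idxOf_append_of_mem hmem]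
        exact_mod_cast List.idxOf_lt_length_of_mem hmem
    -- rc in first and first[rc] < i  ⟺  rc occurred in the prefix
    have hidx2 : ∀ y : String,
        (F.contains y && decide ((F.get? y).getD 0 < (pre.length : Int))) = true ↔ y ∈ pre := by
      intro y
      rw [PySem.Dict.contains_eq_isSome_get?, hF y]
      by_cases hy : y ∈ pre ++ x :: xs
      · rw [if_pos hy]
        simp only [Option.isSome_some, Bool.true_and, Option.getD_some, decide_eq_true_eq]
        constructor
        · intro hlt
          exact hprefix y hy (by exact_mod_cast hlt)
        · intro hmem
          rw [List.idxOf_append_of_mem hmem]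
          exact_mod_cast List.idxOf_lt_length_of_mem hmem
      · rw [if_neg hy]
        simp only [Option.isSome_none, Bool.false_and, Bool.false_eq_true, false_iff]
        exact fun hmem => hy (List.mem_append_left _ hmem)
    have hPre' : ∀ a, a ∈ x :: P ↔ a ∈ pre ++ [x] := by
      intro a
      simp only [List.mem_cons, List.mem_append, hP a]
      tauto
    have hL' : pre ++ x :: xs = (pre ++ [x]) ++ xs := by simp
    have hs' : (pre.length : Int) + 1 = ((pre ++ [x]).length : Int) := by
      simp
    have hidx2' : (F.contains (String.ofList (revcompB x.toList)) &&
        decide ((F.get? (String.ofList (revcompB x.toList))).getD 0 <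
          (pre.length : Int))) = true ↔ rcS x ∈ pre := hidx2 (rcS x)
    by_cases hsk : x ∈ P ∨ rcS x ∈ P
    · -- skipped: either condition fires
      have hstep :
          (if (F.get? x).getD 0 < (pre.length : Int) then acc
           else
             if F.contains (String.ofList (revcompB x.toList)) &&
                 decide ((F.get? (String.ofList (revcompB x.toList))).getD 0 <
                   (pre.length : Int)) then acc
             else acc ++ [(x, String.ofList (revcompB x.toList))]) = acc := by
        rcases hsk with hsk | hsk
        · rw [if_pos (by rw [hget]; simpa using hidx1.mpr ((hP x).mp hsk))]
        · by_cases h1 : (F.get? x).getD 0 < (pre.length : Int)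
          · rw [if_pos h1]
          · rw [if_neg h1, if_pos (hidx2'.mpr ((hP _).mp hsk))]
      rw [hstep]
      rw [show pairsS P (x :: xs) = pairsS (x :: P) xs by simp [pairsS, hsk]]
      exact ih (pre ++ [x]) (x :: P) acc ((pre.length : Int) + 1) hL' hPre' hs'
    · rw [not_or] at hsk
      have h1 : ¬ ((F.get? x).getD 0 < (pre.length : Int)) := by
        rw [hget]
        intro hlt
        exact hsk.1 ((hP x).mpr (hidx1.mp (by simpa using hlt)))
      have h2 : (F.contains (String.ofList (revcompB x.toList)) &&
          decide ((F.get? (String.ofList (revcompB x.toList))).getD 0 <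
            (pre.length : Int))) = false := by
        rw [← Bool.not_eq_true]
        intro hc
        exact hsk.2 ((hP _).mpr (hidx2'.mp hc))
      rw [if_neg h1, h2]
      simp only [Bool.false_eq_true, if_false]
      rw [show pairsS P (x :: xs) = (x, rcS x) :: pairsS (x :: P) xs by
        simp [pairsS, hsk.1, hsk.2]]
      rw [show acc ++ (x, rcS x) :: pairsS (x :: P) xs =
        (acc ++ [(x, rcS x)]) ++ pairsS (x :: P) xs by simp]
      have := ih (pre ++ [x]) (x :: P) (acc ++ [(x, rcS x)]) ((pre.length : Int) + 1)
        hL' hPre' hs'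
      simpa [rcS] using this

-- ---- dict builders, String level ----
def cdAuxS (d : PySem.Dict String Int) (n : Int) :
    List (String × String) → PySem.Dict String Int
  | [] => d
  | p :: ps => cdAuxS ((d.insert p.1 n).insert p.2 n) (n + 1) ps

def ciAuxS (d : PySem.Dict Int (String × String)) (n : Int) :
    List (String × String) → PySem.Dict Int (String × String)
  | [] => d
  | p :: ps => ciAuxS (d.insert n p) (n + 1) ps

theorem cdAux_map :
    ∀ (pl : List (List Char × List Char)) (d : PySem.Dict String Int) (n : Int),
      cdAux d n pl =
        cdAuxS d n (pl.map (fun p => (String.ofList p.1, String.ofList p.2))) := by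
  intro pl
  induction pl with
  | nil => intro d n; rfl
  | cons p ps ih => intro d n; simp only [cdAux, List.map_cons, cdAuxS]; exact ih _ _

theorem ciAux_map :
    ∀ (pl : List (List Char × List Char)) (d : PySem.Dict Int (String × String)) (n : Int),
      ciAux d n pl =
        ciAuxS d n (pl.map (fun p => (String.ofList p.1, String.ofList p.2))) := by
  intro pl
  induction pl with
  | nil => intro d n; rfl
  | cons p ps ih => intro d n; simp only [ciAux, List.map_cons, ciAuxS]; exact ih _ _

theorem cdAuxS_enum :
    ∀ (pl : List (String × String)) (d : PySem.Dict String Int) (s : Int),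
      (PySem.List.enumerate pl s).foldl
        (fun d q => (d.insert q.2.1 q.1).insert q.2.2 q.1) d = cdAuxS d s pl := by
  intro pl
  induction pl with
  | nil => intro d s; rfl
  | cons p ps ih =>
    intro d s
    rw [PySem.List.enumerate_cons, List.foldl_cons]
    exact ih _ (s + 1)

theorem ciAuxS_enum :
    ∀ (pl : List (String × String)) (d : PySem.Dict Int (String × String)) (s : Int),
      (PySem.List.enumerate pl s).foldl (fun d q => d.insert q.1 q.2) d = ciAuxS d s pl := by
  intro pl
  induction pl with
  | nil => intro d s; rfl
  | cons p ps ih =>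
    intro d s
    rw [PySem.List.enumerate_cons, List.foldl_cons]
    exact ih _ (s + 1)

-- ===== VERDICT (by name: the statement is the Claim_ definition above) =====
theorem complement_dicts_spec : Claim_equal_complement_dicts := by
  unfold Claim_equal_complement_dicts
  intro bases ksize _ hpre
  unfold Spec_complement_dicts
  have hacgt := acgt_of_pre bases ksize hpre
  set L := pyProduct bases.toList ksize.toNat with hLdef
  have hA : complement_dicts bases ksize =
      ((cdAux PySem.Dict.empty 0 (pairsA [] L)).items,
       (ciAux PySem.Dict.empty 0 (pairsA [] L)).items) := by
    unfold complement_dicts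
    simp only []
    rw [foldA_eq L PySem.Dict.empty PySem.Dict.empty 0 []
      hacgt (by simp) (fun x _ => by simp [PySem.Dict.contains_empty])]
  have hF : ∀ x, ((PySem.List.enumerate (L.map String.ofList)).foldl
      (fun d p => d.setdefault p.2 p.1) PySem.Dict.empty).get? x =
      if x ∈ L.map String.ofList then some (((L.map String.ofList).idxOf x : Int)) else none := by
    intro x
    rw [first_get?]
    simp [PySem.Dict.contains_empty]
  have hB : complement_dicts_alt bases ksize =
      ((cdAuxS PySem.Dict.empty 0 (pairsS [] (L.map String.ofList))).items,
       (ciAuxS PySem.Dict.empty 0 (pairsS [] (L.map String.ofList))).items) := by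
    unfold complement_dicts_alt
    simp only []
    rw [foldB_pairs (L.map String.ofList) _ hF (L.map String.ofList) [] [] [] 0
      (by simp) (by simp) (by simp)]
    rw [List.nil_append, cdAuxS_enum, ciAuxS_enum]
  rw [hA, hB, cdAux_map, ciAux_map, map_pairsA]
  simp
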